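-- pv_equiv track=rewrite | github.com/PorametKeawubol/pythonic | p11.py | count_cancer_cells
-- ===== SOURCE A (Python) =====
-- def count_cancer_cells(grid, r, c):
--     # Define directions for neighbors (up, down, left, right)
--     directions = [(-1, 0), (1, 0), (0, -1), (0, 1)]
--
--     def is_isolated(x, y):
--         # Check all four possible directions for neighboring cells
--         for dx, dy in directions:
--             nx, ny = x + dx, y + dy
--             if 0 <= nx < r and 0 <= ny < c and grid[nx][ny] == '#':
--                 return False
--         return True
--
--     count = 0
--     for i in range(r):
--         for j in range(c):
--             if grid[i][j] == '#' and is_isolated(i, j):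
--                 count += 1
--
--     return count
-- ===== SOURCE B (Python) =====
-- def count_cancer_cells(grid, r, c):
--     # One pass over adjacencies: mark both endpoints of every '#'-'#' edge
--     # (right and down neighbors only), then count unmarked '#' cells.
--     non_isolated = set()
--     for i in range(r):
--         for j in range(c):
--             if grid[i][j] == '#':
--                 if j + 1 < c and grid[i][j + 1] == '#':
--                     non_isolated.add((i, j))
--                     non_isolated.add((i, j + 1))
--                 if i + 1 < r and grid[i + 1][j] == '#':
--                     non_isolated.add((i, j))
--                     non_isolated.add((i + 1, j))
--     count = 0
--     for i in range(r):
--         for j in range(c):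
--             if grid[i][j] == '#' and (i, j) not in non_isolated:
--                 count += 1
--     return count
-- ===== Notes on version B (the rewrite author's own statement) =====
-- stated objective: alternative
-- what changed: Instead of testing all four directions per cell with an is_isolated probe, B makes one pass that inspects each right/down adjacency once, marking both endpoints of every '#'-'#' edge in a non_isolated set, then counts '#' cells absent from the set.
import Mathlib
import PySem

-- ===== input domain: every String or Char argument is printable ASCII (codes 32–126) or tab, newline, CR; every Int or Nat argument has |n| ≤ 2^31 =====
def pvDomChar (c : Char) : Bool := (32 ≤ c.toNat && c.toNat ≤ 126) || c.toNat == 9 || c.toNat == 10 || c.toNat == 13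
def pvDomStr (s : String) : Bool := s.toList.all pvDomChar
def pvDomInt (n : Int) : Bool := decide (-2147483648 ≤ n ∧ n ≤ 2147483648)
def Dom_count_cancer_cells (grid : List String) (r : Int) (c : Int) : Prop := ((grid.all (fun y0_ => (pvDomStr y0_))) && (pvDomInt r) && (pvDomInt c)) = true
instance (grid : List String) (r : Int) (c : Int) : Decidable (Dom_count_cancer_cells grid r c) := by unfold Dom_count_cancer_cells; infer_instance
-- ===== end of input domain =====

-- B marks both endpoints of every '#'-'#' right/down adjacency in one pass into a set,
-- then counts '#' cells outside the set (alternative decomposition; each adjacency inspected once).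

-- grid[i][j] as a Char; ' ' default is only reached outside Pre_ (Python raises there)
def pvCell (grid : List String) (i j : Int) : Char :=
  PySem.List.pyGetD (PySem.List.pyGetD grid i "").toList j ' '

-- ===== PORT A =====
def pvIsIsolated (grid : List String) (r c x y : Int) : Bool :=
  [((-1 : Int), (0 : Int)), (1, 0), (0, -1), (0, 1)].all fun d =>
    let nx := x + d.1
    let ny := y + d.2
    !(decide (0 ≤ nx) && decide (nx < r) && decide (0 ≤ ny) && decide (ny < c) &&
      (pvCell grid nx ny == '#'))

def count_cancer_cells (grid : List String) (r : Int) (c : Int) : Int :=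
  (PySem.List.pyRange 0 r 1).foldl (fun count i =>
    (PySem.List.pyRange 0 c 1).foldl (fun count j =>
      if pvCell grid i j == '#' && pvIsIsolated grid r c i j then count + 1 else count) count) 0

-- ===== PORT B =====
def pvMark (grid : List String) (r c : Int) (s : PySem.Set (Int × Int)) (p : Int × Int) :
    PySem.Set (Int × Int) :=
  let i := p.1
  let j := p.2
  if pvCell grid i j == '#' then
    let s1 := if decide (j + 1 < c) && (pvCell grid i (j + 1) == '#') then
        PySem.Set.add (PySem.Set.add s (i, j)) (i, j + 1) else s
    if decide (i + 1 < r) && (pvCell grid (i + 1) j == '#') then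
        PySem.Set.add (PySem.Set.add s1 (i, j)) (i + 1, j) else s1
  else s

def pvNonIsolated (grid : List String) (r : Int) (c : Int) : PySem.Set (Int × Int) :=
  (PySem.List.pyRange 0 r 1).foldl (fun s i =>
    (PySem.List.pyRange 0 c 1).foldl (fun s j => pvMark grid r c s (i, j)) s) PySem.Set.empty

def count_cancer_cells_alt (grid : List String) (r : Int) (c : Int) : Int :=
  let non := pvNonIsolated grid r c
  (PySem.List.pyRange 0 r 1).foldl (fun count i =>
    (PySem.List.pyRange 0 c 1).foldl (fun count j =>
      if pvCell grid i j == '#' && !(PySem.Set.contains non (i, j)) then count + 1 else count)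
      count) 0

-- ===== PRECONDITION & SPEC =====
-- Pre_ excludes exactly the inputs where Python A raises IndexError: a positive window
-- r×c that sticks out of the grid (too few rows, or a row among the first r shorter than c).
def Pre_count_cancer_cells (grid : List String) (r : Int) (c : Int) : Prop :=
  0 < r → 0 < c → r ≤ grid.length ∧ ∀ s ∈ grid.take r.toNat, c ≤ (s.length : Int)
instance (grid : List String) (r : Int) (c : Int) : Decidable (Pre_count_cancer_cells grid r c) := by unfold Pre_count_cancer_cells; infer_instance

def pvWitness_count_cancer_cells : List String × Int × Int := (["#.#", ".#.", "##."], 3, 3)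

def Spec_count_cancer_cells (grid : List String) (r : Int) (c : Int) (out : Int) : Prop := out = count_cancer_cells_alt grid r c
instance (grid : List String) (r : Int) (c : Int) (out : Int) : Decidable (Spec_count_cancer_cells grid r c out) := by unfold Spec_count_cancer_cells; infer_instance

-- ===== CLAIM (what is proved, stated in full; the proofs are below) =====
def Claim_equal_count_cancer_cells : Prop := ∀ (grid : List String) (r : Int) (c : Int), Dom_count_cancer_cells grid r c → Pre_count_cancer_cells grid r c → Spec_count_cancer_cells grid r c (count_cancer_cells grid r c)

-- ===== LEMMAS AND PROOFS =====

-- the row-major list of all window coordinates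
def pvPairs (r c : Int) : List (Int × Int) :=
  (PySem.List.pyRange 0 r 1).flatMap fun i => (PySem.List.pyRange 0 c 1).map fun j => (i, j)

lemma mem_pvPairs (r c : Int) (p : Int × Int) :
    p ∈ pvPairs r c ↔ 0 ≤ p.1 ∧ p.1 < r ∧ 0 ≤ p.2 ∧ p.2 < c := by
  obtain ⟨i, j⟩ := p
  simp [pvPairs, List.mem_flatMap, List.mem_map, PySem.List.mem_pyRange_one]
  tauto

-- nested foldl over the two ranges = foldl over the flat pair list
lemma foldl_nested_eq_pairs {β : Type} (r c : Int) (f : β → Int × Int → β) (init : β) :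
    (PySem.List.pyRange 0 r 1).foldl (fun b i =>
      (PySem.List.pyRange 0 c 1).foldl (fun b j => f b (i, j)) b) init
    = (pvPairs r c).foldl f init := by
  unfold pvPairs
  generalize PySem.List.pyRange 0 r 1 = L
  induction L generalizing init with
  | nil => rfl
  | cons i L ih =>
      simp only [List.foldl_cons, List.flatMap_cons, List.foldl_append, List.foldl_map, ih]

-- which cells a processed cell q marks
def pvMarks (grid : List String) (r c : Int) (q p : Int × Int) : Prop :=
  pvCell grid q.1 q.2 = '#' ∧
    ((q.2 + 1 < c ∧ pvCell grid q.1 (q.2 + 1) = '#' ∧ (p = q ∨ p = (q.1, q.2 + 1))) ∨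
     (q.1 + 1 < r ∧ pvCell grid (q.1 + 1) q.2 = '#' ∧ (p = q ∨ p = (q.1 + 1, q.2))))

set_option maxHeartbeats 1000000 in
lemma mem_pvMark (grid : List String) (r c : Int) (s : PySem.Set (Int × Int)) (q p : Int × Int) :
    p ∈ pvMark grid r c s q ↔ p ∈ s ∨ pvMarks grid r c q p := by
  obtain ⟨qi, qj⟩ := q
  obtain ⟨pi, pj⟩ := p
  simp only [pvMark, pvMarks]
  split_ifs with h1 h2 h3 h4 <;>
  · simp only [PySem.Set.mem_add, Prod.mk.injEq, beq_iff_eq, Bool.and_eq_true,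
      decide_eq_true_eq] at *
    tauto

lemma mem_foldl_pvMark (grid : List String) (r c : Int) (L : List (Int × Int))
    (s : PySem.Set (Int × Int)) (p : Int × Int) :
    p ∈ L.foldl (pvMark grid r c) s ↔ p ∈ s ∨ ∃ q ∈ L, pvMarks grid r c q p := by
  induction L generalizing s with
  | nil => simp
  | cons q L ih =>
      simp only [List.foldl_cons, ih, mem_pvMark, List.mem_cons]
      constructor
      · rintro (( h | h ) | ⟨q', hq', h⟩)
        · exact Or.inl h
        · exact Or.inr ⟨q, Or.inl rfl, h⟩
        · exact Or.inr ⟨q', Or.inr hq', h⟩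
      · rintro (h | ⟨q', (rfl | hq'), h⟩)
        · exact Or.inl (Or.inl h)
        · exact Or.inl (Or.inr h)
        · exact Or.inr ⟨q', hq', h⟩

lemma foldl_count_eq {α : Type} (P : α → Bool) (L : List α) (a : Int) :
    L.foldl (fun cnt p => if P p then cnt + 1 else cnt) a = a + L.countP P := by
  induction L generalizing a with
  | nil => simp
  | cons x L ih => by_cases h : P x <;> simp [h, ih] <;> try ring

-- for a window cell holding '#', "not isolated" (A) = "marked by some processed cell" (B)
lemma isolated_iff_unmarked (grid : List String) (r c : Int) (p : Int × Int)
    (hp : p ∈ pvPairs r c) (hc : pvCell grid p.1 p.2 = '#') :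
    pvIsIsolated grid r c p.1 p.2 = false ↔ ∃ q ∈ pvPairs r c, pvMarks grid r c q p := by
  obtain ⟨i, j⟩ := p
  rw [mem_pvPairs] at hp
  obtain ⟨hi0, hir, hj0, hjc⟩ := hp
  simp only at hi0 hir hj0 hjc
  simp only at hc
  constructor
  · intro hiso
    simp only [pvIsIsolated, List.all_cons, List.all_nil, Bool.and_true,
      Bool.and_eq_false_iff, Bool.not_eq_false', Bool.and_eq_true, decide_eq_true_eq,
      beq_iff_eq, and_assoc, add_zero, ← sub_eq_add_neg] at hiso
    rcases hiso with h | h | h | h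
    · -- up neighbor (i-1, j): marked by q = (i-1, j) via its down edge
      obtain ⟨h1, h2, h3, h4, h5⟩ := h
      refine ⟨(i - 1, j), ?_, ?_⟩
      · rw [mem_pvPairs]; exact ⟨h1, by omega, hj0, hjc⟩
      · exact ⟨h5, Or.inr ⟨by omega, by simpa using hc, Or.inr (by simp)⟩⟩
    · -- down neighbor (i+1, j): marked by q = (i, j) itself
      obtain ⟨h1, h2, h3, h4, h5⟩ := h
      refine ⟨(i, j), ?_, ?_⟩
      · rw [mem_pvPairs]; exact ⟨hi0, hir, hj0, hjc⟩
      · exact ⟨hc, Or.inr ⟨h2, h5, Or.inl rfl⟩⟩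
    · -- left neighbor (i, j-1): marked by q = (i, j-1) via its right edge
      obtain ⟨h1, h2, h3, h4, h5⟩ := h
      refine ⟨(i, j - 1), ?_, ?_⟩
      · rw [mem_pvPairs]; exact ⟨hi0, hir, h3, by omega⟩
      · exact ⟨h5, Or.inl ⟨by omega, by simpa using hc, Or.inr (by simp)⟩⟩
    · -- right neighbor (i, j+1): marked by q = (i, j) itself
      obtain ⟨h1, h2, h3, h4, h5⟩ := h
      refine ⟨(i, j), ?_, ?_⟩
      · rw [mem_pvPairs]; exact ⟨hi0, hir, hj0, hjc⟩
      · exact ⟨hc, Or.inl ⟨h4, h5, Or.inl rfl⟩⟩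
  · rintro ⟨q, hq, hqh, hcase⟩
    obtain ⟨qi, qj⟩ := q
    rw [mem_pvPairs] at hq
    obtain ⟨hq1, hq2, hq3, hq4⟩ := hq
    simp only at hq1 hq2 hq3 hq4 hqh
    simp only [pvIsIsolated, List.all_cons, List.all_nil, Bool.and_true,
      Bool.and_eq_false_iff, Bool.not_eq_false', Bool.and_eq_true, decide_eq_true_eq,
      beq_iff_eq, and_assoc, add_zero, ← sub_eq_add_neg]
    rcases hcase with ⟨he, hn, (h | h)⟩ | ⟨he, hn, (h | h)⟩ <;>
      rw [Prod.mk.injEq] at h <;> obtain ⟨h1, h2⟩ := h <;> subst h1 <;> subst h2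
    · -- p = q, right edge: right neighbor of p is '#'
      exact Or.inr (Or.inr (Or.inr ⟨hi0, hir, by omega, he, hn⟩))
    · -- p = (qi, qj+1): left neighbor is q
      exact Or.inr (Or.inr (Or.inl ⟨hi0, hir, by omega, by omega,
        by rwa [add_sub_cancel_right]⟩))
    · -- p = q, down edge: down neighbor of p is '#'
      exact Or.inr (Or.inl ⟨by omega, he, hj0, hjc, hn⟩)
    · -- p = (qi+1, qj): up neighbor is q
      exact Or.inl ⟨by omega, by omega, by omega, by omega, by rwa [add_sub_cancel_right]⟩

theorem ports_agree (grid : List String) (r c : Int) :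
    count_cancer_cells grid r c = count_cancer_cells_alt grid r c := by
  simp only [count_cancer_cells, count_cancer_cells_alt]
  rw [foldl_nested_eq_pairs r c (fun cnt p =>
        if pvCell grid p.1 p.2 == '#' && pvIsIsolated grid r c p.1 p.2 then cnt + 1 else cnt) 0,
      foldl_nested_eq_pairs r c (fun cnt p =>
        if pvCell grid p.1 p.2 == '#' && !(PySem.Set.contains (pvNonIsolated grid r c) p)
        then cnt + 1 else cnt) 0]
  unfold pvNonIsolated
  rw [foldl_nested_eq_pairs r c (fun s p => pvMark grid r c s p) PySem.Set.empty]
  rw [foldl_count_eq, foldl_count_eq]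
  congr 1
  congr 1
  apply List.countP_congr
  intro p hp
  by_cases hc : pvCell grid p.1 p.2 = '#'
  · simp only [hc, beq_self_eq_true, Bool.true_and]
    have hmem := mem_foldl_pvMark grid r c (pvPairs r c) PySem.Set.empty p
    have hiso := isolated_iff_unmarked grid r c p hp hc
    rcases h : pvIsIsolated grid r c p.1 p.2 with _ | _
    · have : ∃ q ∈ pvPairs r c, pvMarks grid r c q p := hiso.mp h
      have hm : p ∈ (pvPairs r c).foldl (pvMark grid r c) PySem.Set.empty := by
        rw [hmem]; exact Or.inr this
      simp
      exact hm
    · have hnm : p ∉ (pvPairs r c).foldl (pvMark grid r c) PySem.Set.empty := by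
        rw [hmem]
        rintro (h' | h')
        · simp [PySem.Set.empty] at h'
        · exact absurd (hiso.mpr h') (by simp [h])
      simp
      exact hnm
  · simp [beq_iff_eq, hc]

-- ===== VERDICT (by name: the statement is the Claim_ definition above) =====
theorem count_cancer_cells_spec : Claim_equal_count_cancer_cells := by
  intro grid r c _ _
  unfold Spec_count_cancer_cells
  exact ports_agree grid r c
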